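-- pv_equiv track=rewrite | github.com/ElchaabiMohamed/InferCode_SVM | NC-5690-python-files/program_5152.py | sousChaine
-- ===== SOURCE A (Python) =====
-- def sousChaine(s1,s2):
--   Trouve=False
--   i=0
--   while i<len(s1) and i<len(s2):
--     ok=False
--     if s1 in s2:
--       Trouve=True
--     i=i+1
--   if s1=='':
--     Trouve=True
--   return Trouve
-- ===== SOURCE B (Python) =====
-- def sousChaine(s1, s2):
--     n = len(s1)
--     for i in range(len(s2) - n + 1):
--         if s2[i:i+n] == s1:
--             return True
--     return False
-- ===== Notes on version B (the rewrite author's own statement) =====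
-- stated objective: faster
-- what changed: A re-runs the full substring test 's1 in s2' on every iteration of a loop that runs min(len(s1),len(s2)) times and then patches the empty-string case; B is a single explicit window scan that compares s2[i:i+len(s1)] to s1 and returns at the first match.
import Mathlib
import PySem

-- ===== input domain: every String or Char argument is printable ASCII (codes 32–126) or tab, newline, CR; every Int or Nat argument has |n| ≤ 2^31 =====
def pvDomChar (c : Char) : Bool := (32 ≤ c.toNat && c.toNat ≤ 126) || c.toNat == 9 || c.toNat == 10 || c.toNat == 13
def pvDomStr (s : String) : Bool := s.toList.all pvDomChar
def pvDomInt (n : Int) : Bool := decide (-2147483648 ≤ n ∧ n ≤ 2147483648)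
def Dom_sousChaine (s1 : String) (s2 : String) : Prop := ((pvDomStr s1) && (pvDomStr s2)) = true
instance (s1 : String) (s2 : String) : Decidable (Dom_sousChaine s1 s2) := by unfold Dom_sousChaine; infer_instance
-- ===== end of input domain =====

-- B replaces A's loop that re-tests `s1 in s2` once per iteration (plus a trailing
-- empty-string patch) by a single explicit window scan comparing s2[i:i+len(s1)] to s1.

-- ===== PORT A =====
-- the while loop: state (i, Trouve); `ok=False` is dead local state and drops out
def sousChaineLoop (s1 : String) (s2 : String) (i : Int) (trouve : Bool) : Bool :=
  if i < PySem.Str.len s1 ∧ i < PySem.Str.len s2 then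
    sousChaineLoop s1 s2 (i + 1) (if PySem.Str.isIn s1 s2 then true else trouve)
  else trouve
termination_by (min (PySem.Str.len s1) (PySem.Str.len s2) - i).toNat
decreasing_by omega

def sousChaine (s1 : String) (s2 : String) : Bool :=
  let trouve := sousChaineLoop s1 s2 0 false
  if s1 == "" then true else trouve

-- ===== PORT B =====
-- the for loop with early `return True` is the `any` over range(len(s2)-n+1);
-- s2[i:i+n] is PySem.List.slice on the character list (exact for string slicing)
def sousChaine_alt (s1 : String) (s2 : String) : Bool :=
  let n := PySem.Str.len s1
  (PySem.List.pyRange 0 (PySem.Str.len s2 - n + 1) 1).any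
    (fun i => PySem.List.slice s2.toList (some i) (some (i + n)) == s1.toList)

-- ===== PRECONDITION & SPEC =====
def Spec_sousChaine (s1 : String) (s2 : String) (out : Bool) : Prop := out = sousChaine_alt s1 s2
instance (s1 : String) (s2 : String) (out : Bool) : Decidable (Spec_sousChaine s1 s2 out) := by unfold Spec_sousChaine; infer_instance

-- ===== CLAIM (what is proved, stated in full; the proofs are below) =====
def Claim_equal_sousChaine : Prop := ∀ (s1 : String) (s2 : String), Dom_sousChaine s1 s2 → Spec_sousChaine s1 s2 (sousChaine s1 s2)

-- ===== LEMMAS AND PROOFS =====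

-- the loop returns trouve OR (the guard held at least once AND s1 in s2)
lemma sousChaineLoop_eq (s1 s2 : String) (i : Int) (t : Bool) :
    sousChaineLoop s1 s2 i t
      = (t || (decide (i < PySem.Str.len s1 ∧ i < PySem.Str.len s2) && PySem.Str.isIn s1 s2)) := by
  fun_induction sousChaineLoop s1 s2 i t with
  | case1 i t h ih =>
      cases hin : PySem.Str.isIn s1 s2 <;> simp_all
  | case2 i t h =>
      rw [PySem.Str.len_eq, PySem.Str.len_eq] at h
      simp only [String.length_toList] at h
      simp [h]

-- B computes exactly `s1 in s2`
lemma sousChaine_alt_eq_isIn (s1 s2 : String) :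
    sousChaine_alt s1 s2 = PySem.Chars.isIn s1.toList s2.toList := by
  rw [Bool.eq_iff_iff]
  unfold sousChaine_alt
  simp only [List.any_eq_true, PySem.List.mem_pyRange_one, beq_iff_eq, PySem.Str.len_eq]
  rw [← PySem.Chars.exists_prefix_drop_iff_isIn]
  constructor
  · rintro ⟨i, ⟨hi0, _⟩, hsl⟩
    refine ⟨i.toNat, ?_⟩
    rw [PySem.List.slice_toNat s2.toList hi0 (by omega)] at hsl
    have hlen : (i + (s1.toList.length : Int)).toNat - i.toNat = s1.toList.length := by omega
    rw [hlen] at hsl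
    rw [List.prefix_iff_eq_take]
    exact hsl.symm
  · rintro ⟨j, hj⟩
    have hlen1 : s1.toList.length ≤ s2.toList.length - j := by
      have := hj.length_le
      simpa using this
    rcases eq_or_ne s1.toList [] with h1 | h1
    · refine ⟨0, ⟨le_refl 0, by rw [h1]; simp only [List.length_nil, Nat.cast_zero, sub_zero]; positivity⟩, ?_⟩
      rw [PySem.List.slice_toNat s2.toList le_rfl (by simp [h1])]
      simp [h1]
    · have hpos : 0 < s1.toList.length := List.length_pos_iff.mpr h1
      have hjle : j + s1.toList.length ≤ s2.toList.length := by omega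
      refine ⟨(j : Int), ⟨by positivity, by omega⟩, ?_⟩
      rw [PySem.List.slice_toNat s2.toList (by positivity) (by positivity)]
      have hlen : ((j : Int) + (s1.toList.length : Int)).toNat - ((j : Int)).toNat = s1.toList.length := by omega
      simp only [Int.toNat_natCast] at hlen ⊢
      rw [hlen]
      exact (List.prefix_iff_eq_take.mp hj).symm

-- s1 in '' is false for nonempty s1
lemma isIn_nil_of_ne (l1 : List Char) (h : l1 ≠ []) : PySem.Chars.isIn l1 [] = false := by
  rw [PySem.Chars.isIn_eq_false_iff]
  intro hc
  exact h (List.eq_nil_of_infix_nil hc)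

theorem sousChaine_spec : Claim_equal_sousChaine := by
  intro s1 s2 _
  unfold Spec_sousChaine sousChaine
  rw [sousChaine_alt_eq_isIn, sousChaineLoop_eq]
  by_cases h1 : s1 = ""
  · have : s1.toList = [] := by simp [h1]
    simp [h1, PySem.Chars.isIn_nil]
  · have hl1 : s1.toList ≠ [] := by
      intro h; exact h1 (by simpa using h)
    simp only [beq_iff_eq, h1, if_false, Bool.false_or, PySem.Str.isIn_eq, PySem.Str.len_eq]
    by_cases h2 : s2.toList = []
    · simp [h2, isIn_nil_of_ne _ hl1]
    · have a1 : (0:Int) < s1.toList.length := by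
        exact_mod_cast List.length_pos_iff.mpr hl1
      have a2 : (0:Int) < s2.toList.length := by
        exact_mod_cast List.length_pos_iff.mpr h2
      simp only [a1, a2, and_self, decide_true, Bool.true_and]
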